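-- pv_equiv track=rewrite | github.com/dslsyeoh/python-examples | beginner/loop_samples.py | list_prime_number
-- ===== SOURCE A (Python) =====
-- def list_prime_number(my_list):
--     result = []
--     for value in my_list:
--         if value == 0:
--             continue
--         if 1 <= value <= 3:
--             result.append(value)
--         else:
--             counter = 0
--             for index in range(2, len(my_list)):
--                 if value % my_list[index] == 0:
--                     counter += 1
--             if counter == 1:
--                 result.append(value)
--     return result
-- ===== SOURCE B (Python) =====
-- def list_prime_number(my_list):
--     tail = my_list[2:]
--     # distinct values that will need a divisor count, in first-occurrence order
--     candidates = []
--     for v in my_list: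
--         if v != 0 and not (1 <= v <= 3) and v not in candidates:
--             candidates.append(v)
--     count = {}
--     for v in candidates:
--         count[v] = 0
--     # divisor-major nesting: each tail element contributes to every candidate at once
--     for d in tail:
--         for v in candidates:
--             if v % d == 0:
--                 count[v] += 1
--     result = []
--     for v in my_list:
--         if v == 0:
--             continue
--         if 1 <= v <= 3:
--             result.append(v)
--         elif count[v] == 1:
--             result.append(v)
--     return result
-- ===== Notes on version B (the rewrite author's own statement) =====
-- stated objective: alternative
-- what changed: B inverts the loop nesting: it collects the distinct candidate values once, makes a single divisor-major pass over my_list[2:] updating all candidates' counts at once, and emits the result in a final pass, replacing A's per-value rescan of the whole list.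
import Mathlib
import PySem

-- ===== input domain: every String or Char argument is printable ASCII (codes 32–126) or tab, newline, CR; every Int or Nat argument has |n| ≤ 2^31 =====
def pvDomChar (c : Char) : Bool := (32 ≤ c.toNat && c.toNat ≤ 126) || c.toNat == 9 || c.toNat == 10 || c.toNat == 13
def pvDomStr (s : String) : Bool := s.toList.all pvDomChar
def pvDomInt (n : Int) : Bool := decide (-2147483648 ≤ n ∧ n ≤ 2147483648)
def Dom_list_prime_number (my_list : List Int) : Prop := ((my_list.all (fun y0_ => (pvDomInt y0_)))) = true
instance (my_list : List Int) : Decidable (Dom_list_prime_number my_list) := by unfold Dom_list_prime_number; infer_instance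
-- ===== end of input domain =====

-- B inverts the loop nesting: one divisor-major pass over my_list[2:] updates the counts of
-- all distinct candidate values at once, then a final pass emits the result (objective: alternative).

-- ===== PORT A =====
def list_prime_number (my_list : List Int) : List Int :=
  my_list.foldl (fun result value =>
    if value == 0 then result
    else if 1 ≤ value ∧ value ≤ 3 then result ++ [value]
    else
      let counter : Int := (PySem.List.pyRange 2 (my_list.length : Int) 1).foldl
        (fun c index =>
          if PySem.Int.mod value (PySem.List.pyGetD my_list index 0) == 0 then c + 1 else c) 0
      if counter == 1 then result ++ [value] else result) []

-- ===== PORT B =====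
def list_prime_number_alt (my_list : List Int) : List Int :=
  let tail := PySem.List.slice my_list (some 2) none
  let candidates : PySem.Set Int :=
    my_list.foldl (fun s v =>
      if v ≠ 0 ∧ ¬ (1 ≤ v ∧ v ≤ 3) then PySem.Set.add s v else s) PySem.Set.empty
  let count0 : PySem.Dict Int Int :=
    candidates.foldl (fun d v => d.insert v 0) PySem.Dict.empty
  -- count[v] += 1  is  modify v 0 (· + 1); the key is always present (count[v] never raises in Python)
  let count : PySem.Dict Int Int :=
    tail.foldl (fun cnt d =>
      candidates.foldl (fun cnt v =>
        if PySem.Int.mod v d == 0 then cnt.modify v 0 (· + 1) else cnt) cnt) count0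
  my_list.foldl (fun result v =>
    if v == 0 then result
    else if 1 ≤ v ∧ v ≤ 3 then result ++ [v]
    else if count.getD v 0 == 1 then result ++ [v] else result) []

-- ===== PRECONDITION & SPEC =====
-- Pre_ excludes exactly the inputs on which Python A (and B) raises ZeroDivisionError:
-- a 0 among my_list[2:] while some value reaches the divisor-counting branch.
def Pre_list_prime_number (my_list : List Int) : Prop :=
  (0 : Int) ∈ my_list.drop 2 → ∀ v ∈ my_list, v = 0 ∨ (1 ≤ v ∧ v ≤ 3)
instance (my_list : List Int) : Decidable (Pre_list_prime_number my_list) := by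
  unfold Pre_list_prime_number; infer_instance
def pvWitness_list_prime_number : List Int := [5, 1, 2, 10]
def Spec_list_prime_number (my_list : List Int) (out : List Int) : Prop := out = list_prime_number_alt my_list
instance (my_list : List Int) (out : List Int) : Decidable (Spec_list_prime_number my_list out) := by unfold Spec_list_prime_number; infer_instance

-- ===== CLAIM (what is proved, stated in full; the proofs are below) =====
def Claim_equal_list_prime_number : Prop := ∀ (my_list : List Int), Dom_list_prime_number my_list → Pre_list_prime_number my_list → Spec_list_prime_number my_list (list_prime_number my_list)

-- ===== LEMMAS AND PROOFS =====

-- candidates = the distinct candidate values of my_list, in first-occurrence order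
lemma candidates_eq (xs : List Int) :
    xs.foldl (fun s v => if v ≠ 0 ∧ ¬ (1 ≤ v ∧ v ≤ 3) then PySem.Set.add s v else s) PySem.Set.empty
    = PySem.Set.ofList (xs.filter (fun v => decide (v ≠ 0 ∧ ¬ (1 ≤ v ∧ v ≤ 3)))) := by
  rw [PySem.List.foldl_ite_eq_foldl_filter]
  have := PySem.Set.update_map_eq_foldl_add (f := fun b : Int => b)
    (l := xs.filter (fun v => decide (v ≠ 0 ∧ ¬ (1 ≤ v ∧ v ≤ 3)))) (s := PySem.Set.empty)
  simp only [List.map_id'] at this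
  rw [← this, PySem.Set.update_empty]

-- initialisation: every key of L maps to 0
lemma getD_init (L : List Int) (v : Int) (d : PySem.Dict Int Int) :
    (L.foldl (fun d v => d.insert v 0) d).getD v 0
    = if v ∈ L then 0 else d.getD v 0 := by
  induction L generalizing d with
  | nil => simp
  | cons a t ih =>
    simp only [List.foldl_cons, ih, List.mem_cons]
    by_cases hv : v ∈ t
    · simp [hv]
    · by_cases hva : v = a
      · simp [hva]
      · simp [hv, hva, PySem.Dict.getD_insert]

-- inner pass over the (nodup) candidate list, for one divisor d
lemma getD_inner (L : List Int) (hnd : L.Nodup) (d : Int) (cnt : PySem.Dict Int Int) (v : Int) :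
    ((L.foldl (fun cnt u =>
        if PySem.Int.mod u d == 0 then cnt.modify u 0 (· + 1) else cnt) cnt).getD v 0)
    = cnt.getD v 0 + (if v ∈ L ∧ PySem.Int.mod v d == 0 then 1 else 0) := by
  rw [PySem.List.foldl_if_eq_foldl_filter]
  rw [PySem.Dict.getD_foldl_modify_add_one]
  have hc : (L.filter (fun u => PySem.Int.mod u d == 0)).count v
      = if v ∈ L ∧ PySem.Int.mod v d == 0 then 1 else 0 := by
    by_cases hp : PySem.Int.mod v d = 0
    · rw [List.count_filter (by simp [hp])]
      by_cases hv : v ∈ L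
      · simp [hv, hp, List.count_eq_one_of_mem hnd hv]
      · simp [hv, hp, List.count_eq_zero_of_not_mem hv]
    · have : v ∉ L.filter (fun u => PySem.Int.mod u d == 0) := by
        simp [List.mem_filter, hp]
      simp [List.count_eq_zero_of_not_mem this, hp]
  rw [hc]
  by_cases h : v ∈ L ∧ PySem.Int.mod v d == 0 <;> simp [h]

-- outer, divisor-major pass: the count of v is the number of tail elements dividing v
lemma getD_outer (tail : List Int) (L : List Int) (hnd : L.Nodup) (v : Int) (hv : v ∈ L)
    (cnt : PySem.Dict Int Int) :
    ((tail.foldl (fun cnt d =>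
        L.foldl (fun cnt u =>
          if PySem.Int.mod u d == 0 then cnt.modify u 0 (· + 1) else cnt) cnt) cnt).getD v 0)
    = cnt.getD v 0 + (tail.countP (fun d => PySem.Int.mod v d == 0) : Int) := by
  induction tail generalizing cnt with
  | nil => simp
  | cons a t ih =>
    simp only [List.foldl_cons, ih, getD_inner L hnd a cnt v, List.countP_cons]
    by_cases h : PySem.Int.mod v a = 0
    · simp [h, hv]; ring
    · simp [h, hv]

-- ===== VERDICT (by name: the statement is the Claim_ definition above) =====
theorem list_prime_number_spec : Claim_equal_list_prime_number := by
  intro xs _ _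
  unfold Spec_list_prime_number list_prime_number list_prime_number_alt
  simp only []
  rw [candidates_eq]
  set cand := PySem.Set.ofList (xs.filter (fun v => decide (v ≠ 0 ∧ ¬ (1 ≤ v ∧ v ≤ 3)))) with hcand
  have hnd : cand.Nodup := PySem.Set.nodup_ofList _
  apply PySem.List.foldl_congr_mem
  intro result value hmem
  by_cases h0 : value = 0
  · simp [h0]
  · by_cases h13 : 1 ≤ value ∧ value ≤ 3
    · simp [h0, h13]
    · have hcv : value ∈ cand := by
        rw [hcand, PySem.Set.mem_ofList, List.mem_filter]
        exact ⟨hmem, by simp [h0, h13]⟩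
      have hA := PySem.List.foldl_pyRange_pyGetD' xs (0:Int)
        (fun c w => if PySem.Int.mod value w == 0 then c + 1 else c) (0:Int)
        (show (0:Int) ≤ 2 by norm_num)
      have hB := getD_outer (PySem.List.slice xs (some 2) none) cand hnd value hcv
        (cand.foldl (fun d v => d.insert v 0) PySem.Dict.empty)
      rw [getD_init] at hB
      simp only [hcv, if_pos] at hB
      simp only [h13, if_false]
      rw [hA, PySem.List.foldl_if_add_one, hB,
        PySem.List.slice_from xs (show (0:Int) ≤ 2 by norm_num)]
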